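-- pv_equiv track=rewrite | github.com/SharifG23o/Logica-Prog | 36-fibonacci.py | contar_terminos_fibonacci
-- ===== SOURCE A (Python) =====
-- def contar_terminos_fibonacci(limite_inferior,limite_superior):
--     cantidad_terminos = 0
--     a=1
--     b=1
--     while a <= limite_superior:
--         if a >= limite_inferior:
--             cantidad_terminos = cantidad_terminos+1
--         c = a+b
--         a = b
--         b = c
--     return cantidad_terminos
-- ===== SOURCE B (Python) =====
-- def _fib(n):
--     # Fast doubling: returns (F(n), F(n+1)) with F(0)=0, F(1)=1.
--     if n == 0:
--         return (0, 1)
--     a, b = _fib(n // 2)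
--     c = a * (2 * b - a)
--     d = a * a + b * b
--     if n % 2 == 0:
--         return (c, d)
--     return (d, c + d)
--
-- def _fib_count_le(x):
--     # Greatest k with F(k) <= x (so the number of sequence terms
--     # 1, 1, 2, 3, 5, ... that are <= x); 0 if x < 1.
--     if x < 1:
--         return 0
--     hi = 1
--     while _fib(2 * hi)[0] <= x:
--         hi *= 2
--     lo, hi = hi, 2 * hi
--     while hi - lo > 1:
--         mid = (lo + hi) // 2
--         if _fib(mid)[0] <= x:
--             lo = mid
--         else:
--             hi = mid
--     return lo
--
-- def contar_terminos_fibonacci(limite_inferior, limite_superior):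
--     return max(0, _fib_count_le(limite_superior) - _fib_count_le(limite_inferior - 1))
-- ===== Notes on version B (the rewrite author's own statement) =====
-- stated objective: alternative
-- what changed: Replaces A's linear walk of the Fibonacci recurrence with comparisons inside the loop by a closed counting formula: the answer is max(0, count_le(upper) - count_le(lower-1)), where count_le(x) finds the largest Fibonacci index with F(k) <= x via fast-doubling Fibonacci plus exponential and binary search on the index.
import Mathlib
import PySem

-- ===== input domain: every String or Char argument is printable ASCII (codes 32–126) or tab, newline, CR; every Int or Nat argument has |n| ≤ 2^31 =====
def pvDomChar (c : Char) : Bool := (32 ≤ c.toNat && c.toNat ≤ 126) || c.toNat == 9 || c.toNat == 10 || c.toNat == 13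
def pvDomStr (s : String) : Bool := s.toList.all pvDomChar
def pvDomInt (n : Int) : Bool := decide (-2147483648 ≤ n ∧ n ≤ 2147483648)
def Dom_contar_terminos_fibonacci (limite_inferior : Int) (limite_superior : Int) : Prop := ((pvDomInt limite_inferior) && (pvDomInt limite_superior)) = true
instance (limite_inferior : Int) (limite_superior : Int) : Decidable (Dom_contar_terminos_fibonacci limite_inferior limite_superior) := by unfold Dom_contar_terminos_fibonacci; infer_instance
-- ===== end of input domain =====

-- B replaces A's linear walk of the Fibonacci recurrence by max(0, count_le(upper) - count_le(lower-1)),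
-- each prefix count found by fast-doubling Fibonacci + exponential/binary search on the index (alternative algorithm).
-- Loop fuels (100 / 32 / 64) are pure totality guards: on the domain (|n| ≤ 2^31) the Python loops run far fewer
-- iterations (Fib 47 > 2^31), so no fuel is ever exhausted on inputs the claim covers.

-- ===== PORT A =====
-- while a <= limite_superior: count if a >= limite_inferior; a, b = b, a+b
def pvLoopA (limite_inferior limite_superior : Int) : Nat → Int → Int → Int → Int
  | 0, _, _, cantidad_terminos => cantidad_terminos
  | fuel + 1, a, b, cantidad_terminos =>
    if a ≤ limite_superior then
      pvLoopA limite_inferior limite_superior fuel b (a + b)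
        (if a ≥ limite_inferior then cantidad_terminos + 1 else cantidad_terminos)
    else
      cantidad_terminos

def contar_terminos_fibonacci (limite_inferior : Int) (limite_superior : Int) : Int :=
  pvLoopA limite_inferior limite_superior 100 1 1 0

-- ===== PORT B =====
-- def _fib(n): fast doubling, returns (F(n), F(n+1))
def pvFib : Nat → Int × Int
  | 0 => (0, 1)
  | n + 1 =>
    let p := pvFib ((n + 1) / 2)
    let a := p.1
    let b := p.2
    let c := a * (2 * b - a)
    let d := a * a + b * b
    if (n + 1) % 2 == 0 then (c, d) else (d, c + d)
decreasing_by exact Nat.div_lt_self (Nat.succ_pos n) (by norm_num)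

-- while _fib(2*hi)[0] <= x: hi *= 2
def pvExpSearch (x : Int) : Nat → Nat → Nat
  | 0, hi => hi
  | fuel + 1, hi => if (pvFib (2 * hi)).1 ≤ x then pvExpSearch x fuel (2 * hi) else hi

-- while hi - lo > 1: mid = (lo+hi)//2; narrow
def pvBinSearch (x : Int) : Nat → Nat → Nat → Nat
  | 0, lo, _ => lo
  | fuel + 1, lo, hi =>
    if hi - lo > 1 then
      let mid := (lo + hi) / 2
      if (pvFib mid).1 ≤ x then pvBinSearch x fuel mid hi else pvBinSearch x fuel lo mid
    else lo

-- def _fib_count_le(x): greatest k with F(k) <= x; 0 if x < 1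
def pvFibCountLE (x : Int) : Int :=
  if x < 1 then 0
  else
    let h := pvExpSearch x 32 1
    ((pvBinSearch x 64 h (2 * h) : Nat) : Int)

def contar_terminos_fibonacci_alt (limite_inferior : Int) (limite_superior : Int) : Int :=
  max 0 (pvFibCountLE limite_superior - pvFibCountLE (limite_inferior - 1))

-- ===== PRECONDITION & SPEC =====
def Spec_contar_terminos_fibonacci (limite_inferior : Int) (limite_superior : Int) (out : Int) : Prop := out = contar_terminos_fibonacci_alt limite_inferior limite_superior
instance (limite_inferior : Int) (limite_superior : Int) (out : Int) : Decidable (Spec_contar_terminos_fibonacci limite_inferior limite_superior out) := by unfold Spec_contar_terminos_fibonacci; infer_instance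

-- ===== CLAIM (what is proved, stated in full; the proofs are below) =====
def Claim_equal_contar_terminos_fibonacci : Prop := ∀ (limite_inferior : Int) (limite_superior : Int), Dom_contar_terminos_fibonacci limite_inferior limite_superior → Spec_contar_terminos_fibonacci limite_inferior limite_superior (contar_terminos_fibonacci limite_inferior limite_superior)

-- ===== LEMMAS AND PROOFS =====

theorem pvFib_eq (n : Nat) : pvFib n = ((Nat.fib n : Int), (Nat.fib (n + 1) : Int)) := by
  induction n using Nat.strong_induction_on with
  | _ n ih =>
    match n with
    | 0 => simp [pvFib]
    | m + 1 =>
      have hlt : (m + 1) / 2 < m + 1 := Nat.div_lt_self (Nat.succ_pos m) (by norm_num)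
      have ihh := ih ((m + 1) / 2) hlt
      rw [pvFib, ihh]
      set q := (m + 1) / 2 with hq
      have hle : Nat.fib q ≤ 2 * Nat.fib (q + 1) :=
        le_trans (Nat.fib_le_fib_succ) (by omega)
      have h1 : Nat.fib (2 * q) = Nat.fib q * (2 * Nat.fib (q + 1) - Nat.fib q) :=
        Nat.fib_two_mul q
      have h2 : Nat.fib (2 * q + 1) = Nat.fib (q + 1) ^ 2 + Nat.fib q ^ 2 :=
        Nat.fib_two_mul_add_one q
      by_cases hpar : (m + 1) % 2 = 0
      · have hm : m + 1 = 2 * q := by omega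
        rw [hm, if_pos (by simp [Nat.mul_mod_right]), Prod.mk.injEq]
        constructor
        · rw [h1, Nat.cast_mul, Nat.cast_sub hle]; push_cast; ring
        · rw [h2]; push_cast; ring
      · have hm : m + 1 = 2 * q + 1 := by omega
        rw [hm, if_neg (by simp [Nat.mul_add_mod]), Prod.mk.injEq]
        have h3 : Nat.fib (2 * q + 1 + 1) = Nat.fib (2 * q) + Nat.fib (2 * q + 1) :=
          Nat.fib_add_two
        constructor
        · rw [h2]; push_cast; ring
        · rw [h3, Nat.cast_add, h1, h2, Nat.cast_mul, Nat.cast_sub hle]; push_cast; ring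

theorem pvExpSearch_spec (x : Int) :
    ∀ (fuel hi : Nat), 0 < hi → (Nat.fib hi : Int) ≤ x → x < (Nat.fib (2 ^ fuel * hi) : Int) →
      0 < pvExpSearch x fuel hi ∧ (Nat.fib (pvExpSearch x fuel hi) : Int) ≤ x ∧
        x < (Nat.fib (2 * pvExpSearch x fuel hi) : Int) := by
  intro fuel
  induction fuel with
  | zero => intro hi hpos hle hlt; simp at hlt; omega
  | succ f ih =>
    intro hi hpos hle hlt
    rw [pvExpSearch]
    by_cases h : (pvFib (2 * hi)).1 ≤ x
    · rw [if_pos h]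
      have h' : (Nat.fib (2 * hi) : Int) ≤ x := by rwa [pvFib_eq] at h
      have : 2 ^ f * (2 * hi) = 2 ^ (f + 1) * hi := by ring
      exact ih (2 * hi) (by omega) h' (by rwa [this])
    · rw [if_neg h]
      rw [pvFib_eq] at h
      exact ⟨hpos, hle, by omega⟩

theorem pvBinSearch_spec (x : Int) :
    ∀ (fuel lo hi : Nat), 0 < lo → lo < hi → hi - lo ≤ fuel + 1 →
      (Nat.fib lo : Int) ≤ x → x < (Nat.fib hi : Int) →
      0 < pvBinSearch x fuel lo hi ∧ (Nat.fib (pvBinSearch x fuel lo hi) : Int) ≤ x ∧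
        x < (Nat.fib (pvBinSearch x fuel lo hi + 1) : Int) := by
  intro fuel
  induction fuel with
  | zero =>
    intro lo hi hpos hlh hf hle hlt
    have hhi : hi = lo + 1 := by omega
    simp only [pvBinSearch]
    exact ⟨hpos, hle, by rwa [← hhi]⟩
  | succ f ih =>
    intro lo hi hpos hlh hf hle hlt
    rw [pvBinSearch]
    by_cases hgap : hi - lo > 1
    · rw [if_pos hgap]
      have hmid1 : lo < (lo + hi) / 2 := by omega
      have hmid2 : (lo + hi) / 2 < hi := by omega
      by_cases h : (pvFib ((lo + hi) / 2)).1 ≤ x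
      · rw [if_pos h]
        rw [pvFib_eq] at h
        exact ih ((lo + hi) / 2) hi (by omega) hmid2 (by omega) h hlt
      · rw [if_neg h]
        rw [pvFib_eq] at h
        exact ih lo ((lo + hi) / 2) hpos hmid1 (by omega) hle (by omega)
    · rw [if_neg hgap]
      have : hi = lo + 1 := by omega
      exact ⟨hpos, hle, by rwa [← this]⟩

theorem fib47_val : (Nat.fib 47 : Int) = 2971215073 := by
  have h : Nat.fib 47 = 2971215073 := by decide
  rw [h]; norm_num

-- characterization of pvFibCountLE on the bounded domain
theorem pvFibCountLE_spec (x : Int) (hx : x ≤ 2147483648) :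
    ∃ c : Nat, pvFibCountLE x = (c : Int) ∧ c ≤ 46 ∧
      ∀ i : Nat, 1 ≤ i → ((Nat.fib i : Int) ≤ x ↔ i ≤ c) := by
  by_cases hlt : x < 1
  · refine ⟨0, by simp [pvFibCountLE, hlt], by omega, ?_⟩
    intro i hi
    have : 1 ≤ Nat.fib i := Nat.fib_pos.2 (by omega)
    constructor
    · intro h; exfalso; have : (1 : Int) ≤ (Nat.fib i : Int) := by exact_mod_cast this
      omega
    · omega
  · push_neg at hlt
    have hx47 : x < (Nat.fib 47 : Int) := by rw [fib47_val]; omega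
    have hfib1 : (Nat.fib 1 : Int) ≤ x := by simp [Nat.fib_one]; omega
    have hbig : x < (Nat.fib (2 ^ 32 * 1) : Int) := by
      have : Nat.fib 47 ≤ Nat.fib (2 ^ 32 * 1) := Nat.fib_mono (by norm_num)
      have : (Nat.fib 47 : Int) ≤ (Nat.fib (2 ^ 32 * 1) : Int) := by exact_mod_cast this
      omega
    obtain ⟨hpos, hle, hlt2⟩ := pvExpSearch_spec x 32 1 (by omega) hfib1 hbig
    set h := pvExpSearch x 32 1 with hh
    -- fuel for the binary search: 2*h - h = h ≤ 46 < 65, since fib h ≤ x < fib 47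
    have h46 : h ≤ 46 := by
      by_contra hc
      push_neg at hc
      have : Nat.fib 47 ≤ Nat.fib h := Nat.fib_mono (by omega)
      have : (Nat.fib 47 : Int) ≤ (Nat.fib h : Int) := by exact_mod_cast this
      omega
    obtain ⟨rpos, rle, rlt⟩ :=
      pvBinSearch_spec x 64 h (2 * h) hpos (by omega) (by omega) hle hlt2
    set r := pvBinSearch x 64 h (2 * h) with hr
    refine ⟨r, ?_, ?_, ?_⟩
    · simp [pvFibCountLE, not_lt.2 hlt, ← hh, ← hr]
    · -- r ≤ 46 since fib r ≤ x < fib 47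
      by_contra hc
      push_neg at hc
      have : Nat.fib 47 ≤ Nat.fib r := Nat.fib_mono (by omega)
      have : (Nat.fib 47 : Int) ≤ (Nat.fib r : Int) := by exact_mod_cast this
      omega
    · intro i hi
      constructor
      · intro hfx
        by_contra hc
        push_neg at hc
        have : Nat.fib (r + 1) ≤ Nat.fib i := Nat.fib_mono (by omega)
        have : (Nat.fib (r + 1) : Int) ≤ (Nat.fib i : Int) := by exact_mod_cast this
        omega
      · intro hir
        have : Nat.fib i ≤ Nat.fib r := Nat.fib_mono hir
        have : (Nat.fib i : Int) ≤ (Nat.fib r : Int) := by exact_mod_cast this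
        omega

-- A's loop, started at (F k, F (k+1)), counts the in-range terms of the next `fuel` indices
theorem pvLoopA_count (lo up : Int) :
    ∀ (fuel k : Nat) (cnt : Int),
      pvLoopA lo up fuel (Nat.fib k : Int) (Nat.fib (k + 1) : Int) cnt =
        cnt + ((List.range fuel).countP
          (fun j => decide (lo ≤ (Nat.fib (k + j) : Int)) && decide ((Nat.fib (k + j) : Int) ≤ up)) : Nat) := by
  intro fuel
  induction fuel with
  | zero => intro k cnt; simp [pvLoopA]
  | succ f ih =>
    intro k cnt
    rw [pvLoopA]
    by_cases h : (Nat.fib k : Int) ≤ up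
    · rw [if_pos h]
      have hsum : (Nat.fib k : Int) + (Nat.fib (k + 1) : Int) = (Nat.fib (k + 1 + 1) : Int) := by
        rw [Nat.fib_add_two]; push_cast; ring
      rw [hsum, ih (k + 1)]
      rw [List.range_succ_eq_map]
      simp only [List.countP_cons, List.countP_map]
      have hshift : ∀ j : Nat, (k + 1) + j = k + (j + 1) := by omega
      by_cases h2 : lo ≤ (Nat.fib k : Int)
      · simp only [ge_iff_le, if_pos h2]
        simp [h, h2, hshift]
        ring_nf
        congr 2
        apply List.countP_congr
        intro j _
        simp [hshift j, Nat.add_comm]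
      · simp only [ge_iff_le, if_neg h2]
        simp [h, h2, hshift]
        apply List.countP_congr
        intro j _
        simp [Function.comp, Nat.succ_eq_add_one]
    · rw [if_neg h]
      have hzero : (List.range (f + 1)).countP
          (fun j => decide (lo ≤ (Nat.fib (k + j) : Int)) && decide ((Nat.fib (k + j) : Int) ≤ up)) = 0 := by
        apply List.countP_eq_zero.2
        intro j _
        have : Nat.fib k ≤ Nat.fib (k + j) := Nat.fib_mono (by omega)
        have : (Nat.fib k : Int) ≤ (Nat.fib (k + j) : Int) := by exact_mod_cast this
        simp; intro _; omega
      rw [hzero]; simp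

-- counting indices in a half-open band inside range n
theorem countP_band (L U : Nat) :
    ∀ n : Nat, (List.range n).countP
      (fun j => decide (L < 1 + j) && decide (1 + j ≤ U)) = min U n - min L n := by
  intro n
  induction n with
  | zero => simp
  | succ m ih =>
    rw [List.range_succ, List.countP_append, ih]
    simp only [List.countP_cons, List.countP_nil]
    by_cases h1 : L < 1 + m <;> by_cases h2 : 1 + m ≤ U <;> simp [h1, h2] <;> omega

-- ===== VERDICT (by name: the statement is the Claim_ definition above) =====
theorem contar_terminos_fibonacci_spec : Claim_equal_contar_terminos_fibonacci := by
  intro lo up hdom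
  unfold Spec_contar_terminos_fibonacci contar_terminos_fibonacci contar_terminos_fibonacci_alt
  have hdom' : -2147483648 ≤ lo ∧ lo ≤ 2147483648 ∧ -2147483648 ≤ up ∧ up ≤ 2147483648 := by
    simp [Dom_contar_terminos_fibonacci, pvDomInt] at hdom; omega
  obtain ⟨U, hU, hU46, hUc⟩ := pvFibCountLE_spec up (by omega)
  obtain ⟨L, hL, hL46, hLc⟩ := pvFibCountLE_spec (lo - 1) (by omega)
  have h11 : ((1 : Int)) = (Nat.fib 1 : Int) := by simp
  have h12 : ((1 : Int)) = (Nat.fib 2 : Int) := by simp [Nat.fib_two]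
  rw [hU, hL]
  calc pvLoopA lo up 100 1 1 0
      = pvLoopA lo up 100 (Nat.fib 1 : Int) (Nat.fib (1 + 1) : Int) 0 := by norm_num
    _ = 0 + ((List.range 100).countP
          (fun j => decide (lo ≤ (Nat.fib (1 + j) : Int)) && decide ((Nat.fib (1 + j) : Int) ≤ up)) : Nat) :=
        pvLoopA_count lo up 100 1 0
    _ = ((List.range 100).countP
          (fun j => decide (L < 1 + j) && decide (1 + j ≤ U)) : Nat) := by
        rw [zero_add]
        congr 1
        apply List.countP_congr
        intro j _
        have e1 : (lo ≤ (Nat.fib (1 + j) : Int)) ↔ (L < 1 + j) := by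
          rw [← not_iff_not]
          push_neg
          constructor
          · intro h; exact (hLc (1 + j) (by omega)).1 (by omega)
          · intro h; have := (hLc (1 + j) (by omega)).2 h; omega
        have e2 : ((Nat.fib (1 + j) : Int) ≤ up) ↔ (1 + j ≤ U) := hUc (1 + j) (by omega)
        simp [e1, e2]
    _ = ((min U 100 - min L 100 : Nat) : Int) := by rw [countP_band]
    _ = max 0 ((U : Int) - (L : Int)) := by
        have : min U 100 = U := by omega
        have : min L 100 = L := by omega
        omega
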